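-- pv_equiv track=rewrite | github.com/pypi-data/pypi-mirror-9 | packages/plib3.stdlib/plib3.stdlib-0.9.20.tar.gz/plib3.stdlib-0.9.20/plib/stdlib/iters.py | cyclic_permutations
-- ===== SOURCE A (Python) =====
-- def cyclic_permutations(iterable):
--     # Generate just the cyclic permutations of iterable
--     # (all permutations are the same length as iterable)
--     # cyclic_permutations('123') -> '123', '231', '312'
--     pool = tuple(iterable)
--     seen = {}  # FIXME: get rid of this?
--     r = len(pool)
--     s = pool + pool
--     for i in range(r):
--         p = s[i:i + r]
--         if p not in seen:
--             seen[p] = p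
--             yield p
-- ===== SOURCE B (Python) =====
-- def cyclic_permutations(iterable):
--     # Find the minimal cyclic period d of the pool, then yield only the
--     # first d rotations: those are exactly the distinct ones, so no
--     # 'seen' dict is needed.
--     pool = tuple(iterable)
--     r = len(pool)
--     s = pool + pool
--     d = r
--     for i in range(1, r):
--         if s[i:i + r] == pool:
--             d = i
--             break
--     for i in range(d):
--         yield s[i:i + r]
-- ===== Notes on version B (the rewrite author's own statement) =====
-- stated objective: alternative
-- what changed: B computes the minimal cyclic period d of the pool first and then emits exactly the first d rotations, eliminating A's 'seen' dict and its per-rotation membership tests; on periodic inputs B stops after O(d*r) work.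
import Mathlib
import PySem

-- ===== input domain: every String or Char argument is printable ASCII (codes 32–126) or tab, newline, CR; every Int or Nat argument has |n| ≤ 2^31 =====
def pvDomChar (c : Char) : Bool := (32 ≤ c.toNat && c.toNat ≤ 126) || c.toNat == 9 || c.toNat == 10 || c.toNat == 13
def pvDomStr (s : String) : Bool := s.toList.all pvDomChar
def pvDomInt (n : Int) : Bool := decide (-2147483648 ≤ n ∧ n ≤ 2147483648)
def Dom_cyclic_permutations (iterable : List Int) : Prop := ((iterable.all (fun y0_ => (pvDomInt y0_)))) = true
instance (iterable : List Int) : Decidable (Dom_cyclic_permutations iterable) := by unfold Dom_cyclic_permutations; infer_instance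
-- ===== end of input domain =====

-- B replaces A's 'seen'-dict dedup over all r rotations by first finding the minimal
-- cyclic period d and then emitting exactly the first d rotations (alternative
-- algorithm; the value compared is the list of yielded rotations).

-- ===== PORT A =====
def cyclic_permutations (iterable : List Int) : List (List Int) :=
  let pool := iterable
  let r : Int := (pool.length : Int)
  let s := pool ++ pool
  ((PySem.List.pyRange 0 r 1).foldl
    (fun (st : PySem.Dict (List Int) (List Int) × List (List Int)) i =>
      let p := PySem.List.slice s (some i) (some (i + r))
      if st.1.contains p then st else (st.1.insert p p, st.2 ++ [p]))
    (PySem.Dict.empty, [])).2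

-- ===== PORT B =====
def cyclic_permutations_alt (iterable : List Int) : List (List Int) :=
  let pool := iterable
  let r : Int := (pool.length : Int)
  let s := pool ++ pool
  let d : Int :=
    match (PySem.List.pyRange 1 r 1).find?
        (fun i => PySem.List.slice s (some i) (some (i + r)) == pool) with
    | some i => i
    | none => r
  (PySem.List.pyRange 0 d 1).map (fun i => PySem.List.slice s (some i) (some (i + r)))

-- ===== PRECONDITION & SPEC =====
def Spec_cyclic_permutations (iterable : List Int) (out : List (List Int)) : Prop := out = cyclic_permutations_alt iterable
instance (iterable : List Int) (out : List (List Int)) : Decidable (Spec_cyclic_permutations iterable out) := by unfold Spec_cyclic_permutations; infer_instance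

-- ===== CLAIM (what is proved, stated in full; the proofs are below) =====
def Claim_equal_cyclic_permutations : Prop := ∀ (iterable : List Int), Dom_cyclic_permutations iterable → Spec_cyclic_permutations iterable (cyclic_permutations iterable)

-- ===== LEMMAS AND PROOFS =====

-- the slice s[k:k+r] of the doubled list is the k-th rotation
theorem slice_rot (l : List Int) (k : ℕ) (h : k ≤ l.length) :
    PySem.List.slice (l ++ l) (some (k : Int)) (some ((k : Int) + (l.length : Int))) = l.rotate k := by
  rw [PySem.List.slice_natCast_add, List.rotate_eq_drop_append_take h]
  rw [List.drop_append, List.take_append]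
  simp [Nat.sub_eq_zero_of_le h, List.length_drop]
  rw [List.take_of_length_le (by simp), Nat.sub_sub_self h]

theorem find?_congr_mem {α : Type} {p q : α → Bool} : ∀ (l : List α),
    (∀ x ∈ l, p x = q x) → l.find? p = l.find? q := by
  intro l
  induction l with
  | nil => intro _; rfl
  | cons a t ih =>
    intro h
    rw [List.find?_cons, List.find?_cons, h a (by simp)]
    cases q a
    · exact ih (fun x hx => h x (by simp [hx]))
    · rfl

theorem pyRange_one_cast (n : ℕ) :
    PySem.List.pyRange 1 (n : Int) 1 = (List.range' 1 (n - 1)).map (fun k : ℕ => (k : Int)) := by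
  rw [PySem.List.pyRange_one, List.range'_eq_map_range, List.map_map]
  have h : ((n : Int) - 1).toNat = n - 1 := by omega
  rw [h]
  apply List.map_congr_left
  intro k _
  simp [Function.comp]

-- minimal cyclic period of l (l.length if l is aperiodic; 0 for [])
def dN (l : List Int) : ℕ :=
  match (List.range' 1 (l.length - 1)).find? (fun k => l.rotate k == l) with
  | some k => k
  | none => l.length

theorem dN_pos (l : List Int) (h : l ≠ []) : 1 ≤ dN l := by
  unfold dN
  cases hf : (List.range' 1 (l.length - 1)).find? (fun k => l.rotate k == l) with
  | none => simpa [Nat.one_le_iff_ne_zero, List.length_eq_zero_iff] using h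
  | some k =>
    rw [List.find?_range'_eq_some] at hf
    have := hf.2.1
    rw [List.mem_range'_1] at this
    show 1 ≤ k
    omega

theorem dN_le (l : List Int) : dN l ≤ l.length := by
  unfold dN
  cases hf : (List.range' 1 (l.length - 1)).find? (fun k => l.rotate k == l) with
  | none => exact le_refl _
  | some k =>
    rw [List.find?_range'_eq_some] at hf
    have := hf.2.1
    rw [List.mem_range'_1] at this
    show k ≤ l.length
    omega

theorem rotate_dN (l : List Int) : l.rotate (dN l) = l := by
  unfold dN
  cases hf : (List.range' 1 (l.length - 1)).find? (fun k => l.rotate k == l) with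
  | none => exact List.rotate_length l
  | some k =>
    rw [List.find?_range'_eq_some] at hf
    simpa using hf.1

theorem dN_min (l : List Int) : ∀ k, 1 ≤ k → k < dN l → l.rotate k ≠ l := by
  intro k h1 h2
  unfold dN at h2
  cases hf : (List.range' 1 (l.length - 1)).find? (fun k => l.rotate k == l) with
  | none =>
    rw [hf] at h2
    rw [List.find?_range'_eq_none] at hf
    have h2' : k < l.length := h2
    have := hf k h1 (by omega)
    simpa using this
  | some i =>
    rw [hf] at h2
    rw [List.find?_range'_eq_some] at hf
    have := hf.2.2 k h1 h2
    simpa using this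

theorem dN_dvd (l : List Int) (h : l ≠ []) : ∀ k, l.rotate k = l → dN l ∣ k := by
  intro k
  induction k using Nat.strong_induction_on with
  | _ k ih =>
    intro hk
    by_cases hkd : k < dN l
    · rcases Nat.eq_zero_or_pos k with rfl | hk1
      · exact Dvd.intro 0 rfl
      · exact absurd hk (dN_min l k hk1 hkd)
    · replace hkd := Nat.le_of_not_lt hkd
      have hrot : l.rotate (k - dN l) = l := by
        apply List.rotate_injective (dN l)
        show (l.rotate (k - dN l)).rotate (dN l) = l.rotate (dN l)
        rw [List.rotate_rotate, Nat.sub_add_cancel hkd, hk, rotate_dN]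
      have := ih (k - dN l) (by have := dN_pos l h; omega) hrot
      have h2 : dN l ∣ (k - dN l) + dN l := Nat.dvd_add this dvd_rfl
      rwa [Nat.sub_add_cancel hkd] at h2

theorem dN_dvd_length (l : List Int) (h : l ≠ []) : dN l ∣ l.length :=
  dN_dvd l h _ (List.rotate_length l)

theorem rot_add_dN (l : List Int) (x : ℕ) : l.rotate (x + dN l) = l.rotate x := by
  have : l.rotate (dN l + x) = l.rotate x := by
    rw [← List.rotate_rotate, rotate_dN]
  rwa [Nat.add_comm]

theorem rot_mod (l : List Int) (h : l ≠ []) (i : ℕ) : l.rotate i = l.rotate (i % dN l) := by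
  have hd : 1 ≤ dN l := dN_pos l h
  induction i using Nat.strong_induction_on with
  | _ i ih =>
    by_cases hi : i < dN l
    · rw [Nat.mod_eq_of_lt hi]
    · replace hi := Nat.le_of_not_lt hi
      have h1 : l.rotate i = l.rotate (i - dN l) := by
        rw [← rot_add_dN l (i - dN l), Nat.sub_add_cancel hi]
      rw [h1, ih (i - dN l) (by omega)]
      have e : i = (i - dN l) + dN l := by omega
      conv_rhs => rw [e, Nat.add_mod_right]

theorem rot_inj (l : List Int) (i j : ℕ) (hij : i < j) (hj : j < dN l) :
    l.rotate i ≠ l.rotate j := by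
  intro heq
  have h : l ≠ [] := by
    intro hnil; subst hnil; simp [dN] at hj
  have hjn : j ≤ l.length := le_trans (le_of_lt hj) (dN_le l)
  have h1 : l.rotate (i + (l.length - j)) = l := by
    have e : j + (l.length - j) = l.length := by omega
    have h2 : (l.rotate j).rotate (l.length - j) = l := by
      rw [List.rotate_rotate, e, List.rotate_length]
    rw [← heq, List.rotate_rotate] at h2
    exact h2
  have hdvd1 := dN_dvd l h _ h1
  have hdvd2 := dN_dvd_length l h
  have hdiff : dN l ∣ (j - i) := by
    have e : i + (l.length - j) = l.length - (j - i) := by omega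
    rw [e] at hdvd1
    have h3 := Nat.dvd_sub hdvd2 hdvd1
    have heq2 : l.length - (l.length - (j - i)) = j - i := by omega
    rwa [heq2] at h3
  have := Nat.le_of_dvd (by omega) hdiff
  omega

theorem out_eq (l : List Int) (m : ℕ) (hm : m ≤ l.length) :
    (PySem.List.pyRange 0 (m : Int) 1).map
      (fun i => PySem.List.slice (l ++ l) (some i) (some (i + (l.length : Int)))) =
    (List.range m).map (l.rotate ·) := by
  rw [PySem.List.pyRange_zero_nat, List.map_map]
  apply List.map_congr_left
  intro k hk
  simp only [Function.comp]
  exact slice_rot l k (le_trans (le_of_lt (List.mem_range.mp hk)) hm)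

theorem alt_eq (l : List Int) :
    cyclic_permutations_alt l = (List.range (dN l)).map (l.rotate ·) := by
  unfold cyclic_permutations_alt
  simp only []
  rw [pyRange_one_cast, List.find?_map]
  rw [find?_congr_mem _ (fun k hk => by
    have hk' : k ≤ l.length := by
      rw [List.mem_range'_1] at hk
      omega
    simp only [Function.comp]
    rw [slice_rot l k hk'])]
  unfold dN
  cases hf : (List.range' 1 (l.length - 1)).find? (fun k => l.rotate k == l) with
  | none =>
    simp only [Option.map_none]
    exact out_eq l l.length (le_refl _)
  | some k =>
    simp only [Option.map_some]
    have hk : k ≤ l.length := by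
      rw [List.find?_range'_eq_some] at hf
      have := hf.2.1
      rw [List.mem_range'_1] at this
      omega
    exact out_eq l k hk

-- a fold that dedups through the dict equals the fold that dedups through the output list
theorem fold_dict (f : ℕ → List Int) : ∀ (is : List ℕ) (D : PySem.Dict (List Int) (List Int)) (acc : List (List Int)),
    (∀ q, D.contains q = acc.contains q) →
    ((is.foldl (fun st i => if st.1.contains (f i) then st else (st.1.insert (f i) (f i), st.2 ++ [f i])) (D, acc)).2
     = is.foldl (fun acc i => if acc.contains (f i) then acc else acc ++ [f i]) acc) := by
  intro is
  induction is with
  | nil => intro D acc h; rfl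
  | cons i t ih =>
    intro D acc h
    simp only [List.foldl_cons]
    rw [h (f i)]
    by_cases hc : acc.contains (f i)
    · simp only [hc, if_true]
      exact ih D acc h
    · simp only [eq_false_of_ne_true hc]
      apply ih
      intro q
      rw [PySem.Dict.contains_insert, h q]
      simp [Bool.or_comm, List.contains_eq_mem]
      by_cases hq : q = f i <;> simp [hq]

theorem phase1 (l : List Int) : ∀ m, m ≤ dN l →
    (List.range m).foldl (fun acc k => if acc.contains (l.rotate k) then acc else acc ++ [l.rotate k]) []
      = (List.range m).map (l.rotate ·) := by
  intro m
  induction m with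
  | zero => intro _; rfl
  | succ m ih =>
    intro hm
    rw [List.range_succ, List.foldl_append, ih (by omega)]
    simp only [List.foldl_cons, List.foldl_nil]
    have hc : ((List.range m).map (l.rotate ·)).contains (l.rotate m) = false := by
      simp only [List.contains_eq_mem, decide_eq_false_iff_not]
      intro hmem
      rcases List.mem_map.mp hmem with ⟨i, hi, hieq⟩
      exact rot_inj l i m (List.mem_range.mp hi) (by omega) hieq
    rw [hc]
    simp

theorem skip_all (l : List Int) : ∀ (is : List ℕ) (acc : List (List Int)),
    (∀ i ∈ is, acc.contains (l.rotate i) = true) →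
    is.foldl (fun acc k => if acc.contains (l.rotate k) then acc else acc ++ [l.rotate k]) acc = acc := by
  intro is
  induction is with
  | nil => intro acc _; rfl
  | cons i t ih =>
    intro acc h
    simp only [List.foldl_cons, h i (by simp)]
    simp only [if_true]
    exact ih acc (fun j hj => h j (by simp [hj]))

theorem a_eq (l : List Int) :
    cyclic_permutations l = (List.range (dN l)).map (l.rotate ·) := by
  unfold cyclic_permutations
  simp only []
  rw [PySem.List.pyRange_zero_nat, List.foldl_map]
  have hcongr : List.foldl
      (fun (st : PySem.Dict (List Int) (List Int) × List (List Int)) (k : ℕ) =>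
        if st.1.contains (PySem.List.slice (l ++ l) (some (k:Int)) (some ((k:Int) + (l.length:Int)))) = true then st
        else (st.1.insert (PySem.List.slice (l ++ l) (some (k:Int)) (some ((k:Int) + (l.length:Int))))
                (PySem.List.slice (l ++ l) (some (k:Int)) (some ((k:Int) + (l.length:Int)))),
              st.2 ++ [PySem.List.slice (l ++ l) (some (k:Int)) (some ((k:Int) + (l.length:Int)))]))
      (PySem.Dict.empty, []) (List.range l.length)
    = List.foldl
      (fun st k =>
        if st.1.contains (l.rotate k) = true then st
        else (st.1.insert (l.rotate k) (l.rotate k), st.2 ++ [l.rotate k]))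
      (PySem.Dict.empty, []) (List.range l.length) := by
    apply PySem.List.foldl_congr_mem
    intro st k hk
    have hk' : k ≤ l.length := le_of_lt (List.mem_range.mp hk)
    simp only [slice_rot l k hk']
  rw [hcongr]
  rw [fold_dict (l.rotate ·) (List.range l.length) PySem.Dict.empty []
    (by intro q; simp [PySem.Dict.contains_empty])]
  by_cases hl : l = []
  · subst hl; simp [dN]
  · have hd1 := dN_pos l hl
    have hdle := dN_le l
    rw [show List.range l.length
        = List.range (dN l) ++ (List.range (l.length - dN l)).map (dN l + ·) from by
      rw [← List.range_add, Nat.add_sub_cancel' hdle]]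
    rw [List.foldl_append, phase1 l (dN l) le_rfl]
    apply skip_all
    intro i hi
    rcases List.mem_map.mp hi with ⟨j, _, rfl⟩
    rw [rot_mod l hl (dN l + j)]
    simp only [List.contains_eq_mem, decide_eq_true_eq]
    exact List.mem_map.mpr ⟨(dN l + j) % dN l, List.mem_range.mpr (Nat.mod_lt _ (by omega)), rfl⟩

-- ===== VERDICT (by name: the statement is the Claim_ definition above) =====
theorem cyclic_permutations_spec : Claim_equal_cyclic_permutations := by
  intro l _
  unfold Spec_cyclic_permutations
  rw [a_eq, alt_eq]
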